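/- GENERATED by tools/from_farm_form.py from prooffarm-gif/accepted/DGifGetImageDesc.E/Proof.lean (a worked proof of the farm's unit `DGifGetImageDesc.E`,
   accepted by the verdict) — do not edit. -/
import Gif.Spec.Units.DGifGetImageDesc_E
import Gif.Spec.AllSegs

open X86 X86.User Asan ProgX.Base ProgX.Base.Spec Gif.Spec

set_option maxRecDepth 4000
set_option maxHeartbeats 4000000

/-!
  `DGifGetImageDesc.E` (0x10949a … the `ret` at 0x1094a6, 7 instructions; dgif_lib.c:479): THE SHARED EXIT OF AN UNPROTECTED FUNCTION:
  `mov eax, ebp`, `add rsp, 8`, four pops, `ret`. No store: the memory at the `ret` is the memory of the entry assertion `Done`.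
    1. the prelude: `Done` = `At` + the results, as walker facts;
    2. the walk to the `ret` (no side goal);
    3. `Returned`, field by field: `HeapInv.raise` lifts the clean stack's end from `RA - 40` to the caller's `RA + 8`.
-/

namespace Gif.Spec.DGifGetImageDesc_E

/-- `mov eax, ebp` zero-extends the low half: the number in `rax` is the number in `rbp` modulo `2 ^ 32`. -/
theorem exit_rax_toNat (x : Word) : (Word.ofBV (Word.part .w32 x)).toNat = x.toNat % 2 ^ 32 := by
  rw [ProgX.toNat_ofBV32, ProgX.toNat_part32]

end Gif.Spec.DGifGetImageDesc_E

/-- The shared exit of `DGifGetImageDesc` takes `Done` at 0x10949a to the contract's `Returned`. -/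
theorem Gif.Spec.Proved.DGifGetImageDesc_E_ok : Gif.Spec.DGifGetImageDesc_E.Statement := by
  intro Lay hLay μ hμ u₀ hcode H rest frames F R e ret Hc Fc v hat
  -- 1. THE PRELUDE: the entry assertion `Done` = `At` + the results
  obtain ⟨hbody, hres, hok1, hok0⟩ := hat
  have he := hbody.entry
  v_entry he
  obtain ⟨henv, hrdi⟩ := hbody.pre
  -- what the walker reads of a segment's entry state: rip, rsp (as `c_rsp`), the registers kept, the text, DF / MXCSR
  have w_rip := hbody.rip
  have c_rsp : v.reg .rsp = e.reg .rsp - 40 := hbody.rsp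
  have w_kept : RegsKept [.rsp] v v := RegsKept.refl _ _
  have w_eq : Mem.EqOn ProgX.Base.L.textLo ProgX.Base.L.textHi u₀.mem v.mem := ProgX.Base.conv_code_eqOn hbody.code
  have hdf := (show abiInv _ from hbody.abi).1
  have hmx := (show abiInv _ from hbody.abi).2
  have hsse := ProgX.Base.sseOK_of_abiInv hbody.abi
  -- the slots the pops and the `ret` read
  have k_r13 : v.mem.readLE (e.reg .rsp - 8) 8 = (e.reg .r13).toNat := hbody.slot_r13
  have k_r12 : v.mem.readLE (e.reg .rsp - 16) 8 = (e.reg .r12).toNat := hbody.slot_r12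
  have k_rbp : v.mem.readLE (e.reg .rsp - 24) 8 = (e.reg .rbp).toNat := hbody.slot_rbp
  have k_rbx : v.mem.readLE (e.reg .rsp - 32) 8 = (e.reg .rbx).toNat := hbody.slot_rbx
  have k_ra : UInt64.ofNat (v.mem.readLE (e.reg .rsp) 8) = ret := hbody.slot_ra
  -- 2. THE WALK, to the `ret` at 0x1094a6 (dgif_lib.c:479)
  u_walk hcode [hμ.vendor] span [ProgX.Base.L.textLo, ProgX.Base.L.textHi] side (v_side)
  -- 3. `Returned`, field by field. The result register, as a number
  have e_rax : (s_1094a6.reg .rax).toNat = (v.reg .rbp).toNat % 2 ^ 32 := by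
    rw [w_rax]
    exact Gif.Spec.DGifGetImageDesc_E.exit_rax_toNat _
  -- the clean stack's end goes up from `RA - 40` to the caller's `RA + 8`, over unprotected stack
  have hinv2 : HeapInv Hc rest frames ((e.reg .rsp).toNat + 8) v.mem := by
    refine hbody.inv.raise (by omega) (by omega) he_top ?_
    exact henv.heap.inv.frames_above
  refine ReachVia.done ?_
  refine X86.User.Returned.mk w_rip w_rsp ?saved ?same (ProgX.Base.conv_code_in w_eq) ?abi ?post
  case saved =>
    -- the popped registers are the walker's facts; `r14 r15` were never touched: `At.r14`, `At.r15`
    intro r hr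
    cases r <;> first
      | exact absurd hr (by decide)
      | (with_reducible assumption)
      | exact (w_kept _ rfl).trans hbody.r14
      | exact (w_kept _ rfl).trans hbody.r15
  case same =>
    -- no store in the segment: the carried footprint
    simp only [X86.User.Spec.footprint, vspec]
    rw [w_mem]
    exact hbody.same
  case abi =>
    -- DF and MXCSR by hand
    refine ProgX.Base.abiInv_of ?_ ?_
    · rw [w_flags]
      simp only [X86.User.df_setStatus]
      exact hdf
    · rw [w_mxcsr]
      exact hmx
  case post =>
    -- `Back2` for the present heap and forest, the forest clause, the result, the two clauses of `Done`
    refine ⟨Hc, Fc, ⟨hbody.region, ?_, ?_, ?_⟩, hbody.forest, ?_, ?_, ?_⟩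
    · rw [w_mem]
      exact hinv2
    · rw [w_mem]
      exact hbody.ok
    · rw [w_mem]
      exact hbody.rem
    · unfold IsBool
      rw [e_rax]
      exact hres
    · rw [e_rax, w_mem]
      exact hok1
    · rw [e_rax]
      exact hok0
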